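-- pv_equiv track=rewrite | github.com/CS683-Group-15/AI-Poker-Agent | testPlayerLeVi.py | check_dupes
-- ===== SOURCE A (Python) =====
-- def check_dupes(hand):
--   count_dict = {}
--   check3 = False
--   check2_1 = False
--   check2_2 = False
--   for card in hand:
--     if card[0] in count_dict:
--       count_dict[card[0]] += 1
--     else:
--       count_dict[card[0]] = 1
--   for count in count_dict.values():
--     if count >= 4:
--       return 7
--     if count == 3:
--       check3 = True
--     if count == 2:
--       if check2_1 == False:
--         check2_1 = True
--       else:
--         check2_2 = True
--   if check3 == True:
--     if check2_1 == True:
--       return 6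
--     return 3
--   if check2_1 == True:
--     if check2_2 == True:
--       return 2
--     return 1
--   return 0
-- ===== SOURCE B (Python) =====
-- def _merge(score, run):
--   # combine the best classification so far with one maximal run of equal ranks
--   if score == 7 or run >= 4:
--     return 7
--   if run == 3:
--     return 3 if score in (0, 3) else 6
--   if run == 2:
--     return 1 if score == 0 else (6 if score >= 3 else 2)
--   return score
--
-- def check_dupes(hand):
--   # Sort the ranks so equal ranks are contiguous, then fold a classification
--   # state over the maximal runs of the sorted list (sort-and-group, no counting map).
--   ranks = sorted(card[0] for card in hand)
--   n = len(ranks)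
--   score = 0
--   i = 0
--   while i < n:
--     j = i + 1
--     while j < n and ranks[j] == ranks[i]:
--       j += 1
--     score = _merge(score, j - i)
--     i = j
--   return score
-- ===== Notes on version B (the rewrite author's own statement) =====
-- stated objective: alternative
-- what changed: Replaced A's hash-map counting plus flag-threading state machine over dict values by sort-and-group: sort the ranks, then fold a classification state over the maximal runs of the sorted list, so no counting dict and no boolean flags exist.
import Mathlib
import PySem

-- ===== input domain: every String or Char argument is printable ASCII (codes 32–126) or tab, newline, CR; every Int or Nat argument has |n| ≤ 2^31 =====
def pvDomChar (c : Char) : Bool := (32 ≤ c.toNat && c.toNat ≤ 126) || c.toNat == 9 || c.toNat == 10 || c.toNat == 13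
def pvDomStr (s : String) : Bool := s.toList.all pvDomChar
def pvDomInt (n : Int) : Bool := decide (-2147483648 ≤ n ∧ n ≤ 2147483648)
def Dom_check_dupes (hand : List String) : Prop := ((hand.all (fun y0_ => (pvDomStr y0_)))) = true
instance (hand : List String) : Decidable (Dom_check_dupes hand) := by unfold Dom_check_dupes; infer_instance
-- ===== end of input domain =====

-- B replaces A's hash-count + flag-threading state machine by sort-and-group: sort the ranks,
-- fold a classification state over the maximal runs of the sorted list (simpler decomposition; same behaviour).

-- ===== PORT A =====
-- card[0]; the ' ' default is never reached under Pre_ (every card is a nonempty string)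
def pvFirstChar (card : String) : Char := (PySem.Str.pyGet? card 0).getD ' '

-- A's second loop: streams the dict values, threading the three flags, with the early 'return 7'
def pvLoopA : List Int → Bool → Bool → Bool → Int
  | [], check3, check2_1, check2_2 =>
      if check3 = true then (if check2_1 = true then 6 else 3)
      else if check2_1 = true then (if check2_2 = true then 2 else 1)
      else 0
  | count :: rest, check3, check2_1, check2_2 =>
      if count ≥ 4 then 7
      else
        pvLoopA rest
          (if count = 3 then true else check3)
          (if count = 2 then true else check2_1)
          (if count = 2 ∧ check2_1 = true then true else check2_2)

def check_dupes (hand : List String) : Int :=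
  let count_dict : PySem.Dict Char Int :=
    hand.foldl (fun d card =>
      if d.contains (pvFirstChar card) then
        d.insert (pvFirstChar card) (d.getD (pvFirstChar card) 0 + 1)
      else
        d.insert (pvFirstChar card) 1) PySem.Dict.empty
  pvLoopA count_dict.values false false false

-- ===== PORT B =====
-- _merge: combine the best classification so far with one maximal run of equal ranks
def pvMerge (score run : Int) : Int :=
  if score = 7 ∨ 4 ≤ run then 7
  else if run = 3 then (if score = 0 ∨ score = 3 then 3 else 6)
  else if run = 2 then (if score = 0 then 1 else if 3 ≤ score then 6 else 2)
  else score

-- B's outer while loop: each iteration takes one maximal run of the sorted rank list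
-- (inner while ≡ takeWhile; continuing at j ≡ dropWhile) and merges its length
def pvRunFold (score : Int) : List Char → Int
  | [] => score
  | r :: t =>
      pvRunFold (pvMerge score (1 + (t.takeWhile (· == r)).length)) (t.dropWhile (· == r))
  termination_by l => l.length
  decreasing_by simpa using Nat.lt_succ_of_le (List.length_dropWhile_le _ _)

def check_dupes_alt (hand : List String) : Int :=
  let ranks := PySem.List.sorted (hand.map pvFirstChar) (fun x => x) false
  pvRunFold 0 ranks

-- ===== PRECONDITION & SPEC =====
-- Pre_ excludes hands containing an empty string: there Python's card[0] raises IndexError (in A and in B alike).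
def Pre_check_dupes (hand : List String) : Prop := ∀ s ∈ hand, s ≠ ""
instance (hand : List String) : Decidable (Pre_check_dupes hand) := by unfold Pre_check_dupes; infer_instance
def pvWitness_check_dupes : List String := ["S2", "H2", "D7"]

def Spec_check_dupes (hand : List String) (out : Int) : Prop := out = check_dupes_alt hand
instance (hand : List String) (out : Int) : Decidable (Spec_check_dupes hand out) := by unfold Spec_check_dupes; infer_instance

-- ===== CLAIM (what is proved, stated in full; the proofs are below) =====
def Claim_equal_check_dupes : Prop := ∀ (hand : List String), Dom_check_dupes hand → Pre_check_dupes hand → Spec_check_dupes hand (check_dupes hand)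

-- ===== LEMMAS AND PROOFS =====

-- the classification as a function of three aggregates of a count/run-length list:
-- some count ≥ 4, some count = 3, how many counts = 2
def pvScore (a4 t3 : Bool) (p2 : Int) : Int :=
  if a4 then 7
  else if t3 then (if 1 ≤ p2 then 6 else 3)
  else if 2 ≤ p2 then 2
  else if p2 = 1 then 1
  else 0

-- A's flag loop computes the aggregate classification of the value list it streams.
theorem pvLoopA_eq (l : List Int) : ∀ (c3 c21 c22 : Bool),
    pvLoopA l c3 c21 c22 =
      if ∃ c ∈ l, 4 ≤ c then 7
      else if c3 = true ∨ 3 ∈ l then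
        (if c21 = true ∨ 1 ≤ l.count 2 then 6 else 3)
      else if c21 = true ∨ 1 ≤ l.count 2 then
        (if c22 = true ∨ (c21 = true ∧ 1 ≤ l.count 2) ∨ 2 ≤ l.count 2 then 2 else 1)
      else 0 := by
  induction l with
  | nil =>
      intro c3 c21 c22
      simp [pvLoopA]
  | cons count rest ih =>
      intro c3 c21 c22
      by_cases h4 : count ≥ 4
      · rw [pvLoopA, if_pos h4, if_pos ⟨count, by simp, h4⟩]
      · rw [pvLoopA, if_neg h4, ih]
        have e1 : (∃ c ∈ count :: rest, 4 ≤ c) ↔ (∃ c ∈ rest, 4 ≤ c) := by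
          simp; intro h; omega
        have e2 : ((if count = 3 then true else c3) = true ∨ 3 ∈ rest)
            ↔ (c3 = true ∨ 3 ∈ count :: rest) := by
          by_cases h3 : count = 3 <;> simp [h3]
          tauto
        have e3 : ((if count = 2 then true else c21) = true ∨ 1 ≤ rest.count 2)
            ↔ (c21 = true ∨ 1 ≤ (count :: rest).count 2) := by
          by_cases h2 : count = 2 <;> simp [h2]
        have e4 : ((if count = 2 ∧ c21 = true then true else c22) = true
              ∨ ((if count = 2 then true else c21) = true ∧ 1 ≤ rest.count 2)
              ∨ 2 ≤ rest.count 2)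
            ↔ (c22 = true ∨ (c21 = true ∧ 1 ≤ (count :: rest).count 2)
              ∨ 2 ≤ (count :: rest).count 2) := by
          by_cases h2 : count = 2 <;>
            by_cases hb : c21 = true <;>
            by_cases hc : c22 = true <;>
            simp [h2, hb, hc] <;> try omega
          all_goals exact fun h => List.count_pos_iff.mp (by omega)
        simp only [e1, e2, e3, e4]

-- that aggregate classification is pvScore
theorem pvLoopA_eq_score (l : List Int) :
    pvLoopA l false false false
      = pvScore (decide (∃ c ∈ l, 4 ≤ c)) (decide (3 ∈ l)) (l.count 2) := by
  rw [pvLoopA_eq]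
  unfold pvScore
  simp only [false_or, false_and, Bool.false_eq_true, decide_eq_true_eq]
  split_ifs <;> omega

-- A's first loop builds exactly Counter of the first characters.
theorem pvDict_eq (hand : List String) :
    hand.foldl (fun d card =>
      if d.contains (pvFirstChar card) then
        d.insert (pvFirstChar card) (d.getD (pvFirstChar card) 0 + 1)
      else
        d.insert (pvFirstChar card) 1) PySem.Dict.empty
    = PySem.Dict.counter (hand.map pvFirstChar) := by
  rw [← PySem.Dict.foldl_insert_getD_add_one_eq_counter, List.foldl_map]
  congr 1
  funext d card
  by_cases h : d.contains (pvFirstChar card) = true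
  · simp [h]
  · simp [h, PySem.Dict.getD_of_not_contains _ _ (by simpa using h)]

-- Counter(ranks).values() is the per-distinct-rank count list.
theorem pvValues_eq (ranks : List Char) :
    (PySem.Dict.counter ranks).values
      = (PySem.List.dedup ranks).map (fun r => (ranks.count r : Int)) := by
  have h := PySem.Dict.items_counter (xs := ranks)
  simp only [PySem.Dict.values, h, List.map_map, PySem.List.dedup_eq_ofList]
  rfl

-- one pvMerge step updates the aggregates of the state
theorem pvMerge_score (a4 t3 : Bool) (p2 L : Int) (hp : 0 ≤ p2) :
    pvMerge (pvScore a4 t3 p2) L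
      = pvScore (a4 || decide (4 ≤ L)) (t3 || decide (L = 3))
          (p2 + if L = 2 then 1 else 0) := by
  cases a4 <;> cases t3 <;>
    simp only [pvMerge, pvScore, Bool.false_or, Bool.true_or, Bool.false_eq_true, true_or,
      eq_self_iff_true, if_true, if_false, decide_eq_true_eq] <;>
    split_ifs <;> omega

-- the first element of each maximal run, in order
def pvHeads : List Char → List Char
  | [] => []
  | r :: t => r :: pvHeads (t.dropWhile (· == r))
  termination_by l => l.length
  decreasing_by simpa using Nat.lt_succ_of_le (List.length_dropWhile_le _ _)

theorem mem_pvHeads (l : List Char) : ∀ x, x ∈ pvHeads l ↔ x ∈ l := by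
  induction l using pvHeads.induct with
  | case1 => simp [pvHeads]
  | case2 r t ih =>
      intro x
      rw [pvHeads]
      have hsplit := List.takeWhile_append_dropWhile (p := (· == r)) (l := t)
      constructor
      · intro hx
        rcases List.mem_cons.mp hx with h | h
        · simp [h]
        · have := (ih x).mp h
          have : x ∈ t := (List.dropWhile_sublist _).mem this
          simp [this]
      · intro hx
        rcases List.mem_cons.mp hx with h | h
        · simp [h]
        · by_cases hxr : x = r
          · simp [hxr]
          · have hx' : x ∈ t.dropWhile (· == r) := by
              rcases (List.mem_append.mp (hsplit ▸ h)) with h1 | h1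
              · exact absurd (by simpa using List.mem_takeWhile_imp h1) hxr
              · exact h1
            exact List.mem_cons_of_mem _ ((ih x).mpr hx')

-- heads of the runs of a sorted list: the run head never reappears later
theorem sorted_head_not_mem_drop {r : Char} {t : List Char}
    (hs : (r :: t).Pairwise (· ≤ ·)) : r ∉ t.dropWhile (· == r) := by
  intro hmem
  have hle : ∀ x ∈ t, r ≤ x := fun x hx => (List.pairwise_cons.mp hs).1 x hx
  have hst : t.Pairwise (· ≤ ·) := (List.pairwise_cons.mp hs).2
  have hsd : (t.dropWhile (· == r)).Pairwise (· ≤ ·) :=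
    hst.sublist (List.dropWhile_sublist _)
  cases hd : t.dropWhile (· == r) with
  | nil => rw [hd] at hmem; exact absurd hmem (List.not_mem_nil)
  | cons h rest =>
      have hne : (h == r) = false := by
        have := List.head?_dropWhile_not (p := (· == r)) (l := t)
        rw [hd] at this; simpa using this
      have hhr : h ≠ r := by simpa using hne
      have hht : h ∈ t := (List.dropWhile_sublist _).mem (by rw [hd]; simp)
      have hrh : r ≤ h := hle h hht
      rw [hd] at hmem
      rcases List.mem_cons.mp hmem with h1 | h1
      · exact hhr h1.symm
      · have : h ≤ r := (List.pairwise_cons.mp (hd ▸ hsd)).1 r h1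
        exact hhr (le_antisymm this hrh)

theorem nodup_pvHeads (l : List Char) (hs : l.Pairwise (· ≤ ·)) :
    (pvHeads l).Nodup := by
  induction l using pvHeads.induct with
  | case1 => simp [pvHeads]
  | case2 r t ih =>
      rw [pvHeads]
      have hst : t.Pairwise (· ≤ ·) := (List.pairwise_cons.mp hs).2
      have hsd : (t.dropWhile (· == r)).Pairwise (· ≤ ·) :=
        hst.sublist (List.dropWhile_sublist _)
      refine List.nodup_cons.mpr ⟨?_, ih hsd⟩
      rw [mem_pvHeads]
      exact sorted_head_not_mem_drop hs

-- on a sorted list, B's run fold visits exactly the multiplicities of the run heads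
theorem pvRunFold_eq (l : List Char) (hs : l.Pairwise (· ≤ ·)) : ∀ s : Int,
    pvRunFold s l = ((pvHeads l).map (fun r => (l.count r : Int))).foldl pvMerge s := by
  induction l using pvHeads.induct with
  | case1 => intro s; simp [pvRunFold, pvHeads]
  | case2 r t ih =>
      intro s
      rw [pvRunFold, pvHeads]
      have hst : t.Pairwise (· ≤ ·) := (List.pairwise_cons.mp hs).2
      have hsd : (t.dropWhile (· == r)).Pairwise (· ≤ ·) :=
        hst.sublist (List.dropWhile_sublist _)
      have hsplit := List.takeWhile_append_dropWhile (p := (· == r)) (l := t)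
      have hrd : r ∉ t.dropWhile (· == r) := sorted_head_not_mem_drop hs
      -- head multiplicity: count r (r::t) = 1 + (takeWhile (· == r) t).length
      have hcount : ((r :: t).count r : Int) = 1 + ((t.takeWhile (· == r)).length : Int) := by
        have h1 : (r :: t).count r = t.count r + 1 := by simp
        have h2 : t.count r = (t.takeWhile (· == r)).count r
            + (t.dropWhile (· == r)).count r := by
          conv_lhs => rw [← hsplit]
          exact List.count_append ..
        have h3 : (t.takeWhile (· == r)).count r = (t.takeWhile (· == r)).length := by
          apply List.count_eq_length.mpr
          intro b hb
          have hb' := List.mem_takeWhile_imp hb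
          simp at hb'
          exact hb'.symm
        have h4 : (t.dropWhile (· == r)).count r = 0 :=
          List.count_eq_zero.mpr hrd
        rw [h1, h2, h3, h4]; push_cast; ring
      -- counts of later heads are unaffected by dropping the first run
      have hmap : (pvHeads (t.dropWhile (· == r))).map
            (fun x => ((t.dropWhile (· == r)).count x : Int))
          = (pvHeads (t.dropWhile (· == r))).map (fun x => ((r :: t).count x : Int)) := by
        apply List.map_congr_left
        intro x hx
        have hxd : x ∈ t.dropWhile (· == r) := (mem_pvHeads _ x).mp hx
        have hxr : x ≠ r := fun h => hrd (h ▸ hxd)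
        have hx1 : (r :: t).count x = t.count x := by
          simp [List.count_cons, hxr, Ne.symm hxr]
        have hx2 : t.count x = (t.takeWhile (· == r)).count x
            + (t.dropWhile (· == r)).count x := by
          conv_lhs => rw [← hsplit]
          exact List.count_append ..
        have hx3 : (t.takeWhile (· == r)).count x = 0 :=
          List.count_eq_zero.mpr (fun hmem => hxr (by simpa using List.mem_takeWhile_imp hmem))
        simp [hx1, hx2, hx3]
      rw [ih hsd, List.map_cons, List.foldl_cons, hmap, hcount]

-- folding pvMerge from 0 computes pvScore of the aggregates of the visited list
theorem foldl_pvMerge_score (l : List Int) : ∀ (a4 t3 : Bool) (p2 : Int), 0 ≤ p2 →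
    l.foldl pvMerge (pvScore a4 t3 p2)
      = pvScore (a4 || decide (∃ c ∈ l, 4 ≤ c)) (t3 || decide (3 ∈ l))
          (p2 + l.count 2) := by
  induction l with
  | nil => intro a4 t3 p2 _; simp
  | cons L rest ih =>
      intro a4 t3 p2 hp
      rw [List.foldl_cons, pvMerge_score a4 t3 p2 L hp,
        ih _ _ _ (by split_ifs <;> omega)]
      have e1 : ((a4 || decide (4 ≤ L)) || decide (∃ c ∈ rest, 4 ≤ c))
          = (a4 || decide (∃ c ∈ L :: rest, 4 ≤ c)) := by
        rw [Bool.or_assoc, ← Bool.decide_or]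
        congr 1
        apply decide_eq_decide.mpr
        constructor
        · rintro (h | ⟨c, hc, h4⟩)
          exacts [⟨L, List.mem_cons_self, h⟩, ⟨c, List.mem_cons_of_mem _ hc, h4⟩]
        · rintro ⟨c, hc, h4⟩
          rcases List.mem_cons.mp hc with rfl | hc
          exacts [Or.inl h4, Or.inr ⟨c, hc, h4⟩]
      have e2 : ((t3 || decide (L = 3)) || decide (3 ∈ rest))
          = (t3 || decide (3 ∈ L :: rest)) := by
        rw [Bool.or_assoc, ← Bool.decide_or]
        congr 1
        apply decide_eq_decide.mpr
        simp [eq_comm]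
      have e3 : p2 + (if L = 2 then 1 else 0) + ((rest.count 2 : Nat) : Int)
          = p2 + (((L :: rest).count 2 : Nat) : Int) := by
        rw [List.count_cons]
        by_cases h : L = 2 <;> simp [h] <;> push_cast <;> omega
      rw [e1, e2, e3]

-- pvScore only depends on the three aggregates, which are invariant under permutation
theorem score_of_perm (l₁ l₂ : List Int) (hp : l₁.Perm l₂) :
    pvScore (decide (∃ c ∈ l₁, 4 ≤ c)) (decide (3 ∈ l₁)) (l₁.count 2)
      = pvScore (decide (∃ c ∈ l₂, 4 ≤ c)) (decide (3 ∈ l₂)) (l₂.count 2) := by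
  have h1 : (∃ c ∈ l₁, 4 ≤ c) ↔ (∃ c ∈ l₂, 4 ≤ c) := by
    constructor <;> rintro ⟨c, hc, h4⟩
    · exact ⟨c, hp.mem_iff.mp hc, h4⟩
    · exact ⟨c, hp.mem_iff.mpr hc, h4⟩
  rw [decide_eq_decide.mpr h1, decide_eq_decide.mpr hp.mem_iff, hp.count_eq]

-- ===== VERDICT (by name: the statement is the Claim_ definition above) =====
theorem check_dupes_spec : Claim_equal_check_dupes := by
  intro hand _ _
  unfold Spec_check_dupes check_dupes check_dupes_alt
  dsimp only
  set ranks := hand.map pvFirstChar with hranks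
  set s := PySem.List.sorted ranks (fun x => x) false with hsorted
  have hpair : s.Pairwise (· ≤ ·) := by
    simpa using PySem.List.sorted_pairwise (xs := ranks) (key := fun x => x)
  have hperm : s.Perm ranks := PySem.List.sorted_perm ..
  rw [pvDict_eq, pvValues_eq, pvLoopA_eq_score,
    pvRunFold_eq s hpair 0]
  have h0 : (0 : Int) = pvScore false false 0 := by simp [pvScore]
  rw [h0, foldl_pvMerge_score _ false false 0 le_rfl]
  simp only [Bool.false_or, zero_add]
  -- the run-length list of the sorted ranks is a permutation of the distinct-rank count list
  have hcnt : ∀ x, s.count x = ranks.count x := fun x => hperm.count_eq x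
  have hmapeq : (pvHeads s).map (fun r => (s.count r : Int))
      = (pvHeads s).map (fun r => (ranks.count r : Int)) := by
    apply List.map_congr_left; intro x _; rw [hcnt]
  have hheads : (pvHeads s).Perm (PySem.List.dedup ranks) := by
    apply (List.perm_ext_iff_of_nodup (nodup_pvHeads s hpair)
      (PySem.List.nodup_dedup ranks)).mpr
    intro a
    rw [mem_pvHeads, PySem.List.mem_dedup, hperm.mem_iff]
  have hpermL : ((pvHeads s).map (fun r => (ranks.count r : Int))).Perm
      ((PySem.List.dedup ranks).map (fun r => (ranks.count r : Int))) :=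
    hheads.map _
  rw [hmapeq]
  exact (score_of_perm _ _ hpermL).symm
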